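-- pv_equiv track=rewrite | github.com/weed478/asd1 | exam/1/zad1.py | chaos_index
-- ===== SOURCE A (Python) =====
-- def insertion_sort(A, p, r):
--     for i in range(p + 1, r):
--         for j in range(i, p, -1):
--             if A[j - 1][0] > A[j][0]:
--                 A[j - 1], A[j] = A[j], A[j - 1]
--             else:
--                 break
--
-- def chaos_index(T):
--     n = len(T)
--
--     A = [(T[i], i) for i in range(n)]
--
--     insertion_sort(A, 0, n)
--
--     k = 0
--     for i in range(n):
--         k = max(k, abs(A[i][1] - i))
--
--     return k
-- ===== SOURCE B (Python) =====
-- def chaos_index(T):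
--     k = 0
--     for i, x in enumerate(T):
--         r = sum(1 for y in T if y < x) + sum(1 for y in T[:i] if y == x)
--         k = max(k, abs(r - i))
--     return k
-- ===== Notes on version B (the rewrite author's own statement) =====
-- stated objective: alternative
-- what changed: Replaces the insertion sort of (value, index) pairs followed by a displacement scan with a direct per-element computation of the stable-sort rank by counting (strictly smaller elements anywhere plus equal elements earlier), taking the max of |rank - i| in one pass with no sorting.
import Mathlib
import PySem

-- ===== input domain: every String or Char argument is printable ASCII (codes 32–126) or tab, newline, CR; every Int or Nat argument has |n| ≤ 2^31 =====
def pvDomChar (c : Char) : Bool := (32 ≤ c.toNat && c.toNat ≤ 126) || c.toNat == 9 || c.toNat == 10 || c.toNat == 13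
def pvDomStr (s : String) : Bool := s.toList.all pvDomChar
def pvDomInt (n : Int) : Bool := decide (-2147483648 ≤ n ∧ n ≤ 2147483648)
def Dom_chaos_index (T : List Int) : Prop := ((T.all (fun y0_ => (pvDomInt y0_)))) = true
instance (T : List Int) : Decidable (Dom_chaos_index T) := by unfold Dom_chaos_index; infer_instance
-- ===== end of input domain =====

-- B replaces the insertion sort by a direct count of each element's stable sorted rank (alternative algorithm, same value).

-- ===== PORT A =====
-- inner loop of insertion_sort: 'for j in range(i, 0, -1): swap A[j-1],A[j] or break', recursion on j
def pvInnerA (A : List (Int × Int)) : Nat → List (Int × Int)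
  | 0 => A
  | j + 1 =>
    match A[j]?, A[j + 1]? with
    | some a, some b => if a.1 > b.1 then pvInnerA ((A.set j b).set (j + 1) a) j else A
    | _, _ => A

-- insertion_sort(A, 0, n): 'for i in range(1, n)'
def pvSortA (A : List (Int × Int)) (n : Nat) : List (Int × Int) :=
  (List.range' 1 (n - 1)).foldl (fun A i => pvInnerA A i) A

def chaos_index (T : List Int) : Int :=
  let n := T.length
  let A := T.zipIdx.map (fun p => (p.1, (p.2 : Int)))   -- [(T[i], i) for i in range(n)]
  let S := pvSortA A n
  -- 'k = 0; for i in range(n): k = max(k, abs(A[i][1] - i))'  (S has length n)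
  S.zipIdx.foldl (fun k p => max k |p.1.2 - (p.2 : Int)|) 0

-- ===== PORT B =====
def pvRankB (T : List Int) (i : Nat) (x : Int) : Int :=
  (T.countP (fun y => decide (y < x)) : Int) + ((T.take i).countP (fun y => decide (y = x)) : Int)

def chaos_index_alt (T : List Int) : Int :=
  T.zipIdx.foldl (fun k p => max k |pvRankB T p.2 p.1 - (p.2 : Int)|) 0

-- ===== PRECONDITION & SPEC =====
def Spec_chaos_index (T : List Int) (out : Int) : Prop := out = chaos_index_alt T
instance (T : List Int) (out : Int) : Decidable (Spec_chaos_index T out) := by unfold Spec_chaos_index; infer_instance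

-- ===== CLAIM (what is proved, stated in full; the proofs are below) =====
def Claim_equal_chaos_index : Prop := ∀ (T : List Int), Dom_chaos_index T → Spec_chaos_index T (chaos_index T)

-- ===== LEMMAS AND PROOFS =====

-- strict lexicographic order on (value, original index) pairs
def pvLexLt (a b : Int × Int) : Bool := decide (a.1 < b.1) || (decide (a.1 = b.1) && decide (a.2 < b.2))

-- insertion into a reversed (descending) prefix: exactly what A's swap loop does
def pvInsRev (x : Int × Int) : List (Int × Int) → List (Int × Int)
  | [] => [x]
  | y :: r => if y.1 > x.1 then y :: pvInsRev x r else x :: y :: r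

def pvRevSort (L : List (Int × Int)) : List (Int × Int) := L.foldl (fun r x => pvInsRev x r) []

def pvPairs (T : List Int) : List (Int × Int) := T.zipIdx.map (fun p => (p.1, (p.2 : Int)))

lemma pvLexLt_irrefl (a : Int × Int) : pvLexLt a a = false := by simp [pvLexLt]

lemma pvLexLt_asymm {a b : Int × Int} (h : pvLexLt a b = true) : pvLexLt b a = false := by
  simp [pvLexLt] at *; omega

lemma pvLexLt_trans {a b c : Int × Int} (h1 : pvLexLt a b = true) (h2 : pvLexLt b c = true) :
    pvLexLt a c = true := by
  simp [pvLexLt] at *; omega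

lemma pvInsRev_perm (x : Int × Int) (r : List (Int × Int)) : (pvInsRev x r).Perm (x :: r) := by
  induction r with
  | nil => simp [pvInsRev]
  | cons y r ih =>
    simp only [pvInsRev]
    split
    · exact ((ih.cons y).trans (List.Perm.swap x y r))
    · exact List.Perm.refl _

lemma pvFoldInsRev_perm : ∀ (L r : List (Int × Int)),
    (L.foldl (fun r x => pvInsRev x r) r).Perm (L ++ r) := by
  intro L
  induction L with
  | nil => simp
  | cons x L ih =>
    intro r
    refine ((ih (pvInsRev x r)).trans ?_)
    exact ((List.Perm.append_left L (pvInsRev_perm x r)).trans List.perm_middle)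

lemma pvRevSort_perm (L : List (Int × Int)) : (pvRevSort L).Perm L := by
  simpa using pvFoldInsRev_perm L []

lemma pv_set_swap : ∀ (q : List (Int × Int)) (y x : Int × Int) (suf : List (Int × Int)),
    ((q ++ y :: x :: suf).set q.length x).set (q.length + 1) y = q ++ x :: y :: suf := by
  intro q
  induction q with
  | nil => intro y x suf; rfl
  | cons a q ih => intro y x suf; simp [List.set]

lemma pv_get_mid {α : Type} : ∀ (q : List α) (y : α) (suf : List α),
    (q ++ y :: suf)[q.length]? = some y := by
  intro q
  induction q with
  | nil => intro y suf; rfl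
  | cons a q _ => intro y suf; simp

lemma pvInner_spec : ∀ (pre : List (Int × Int)) (x : Int × Int) (suf : List (Int × Int)),
    pvInnerA (pre ++ x :: suf) pre.length = (pvInsRev x pre.reverse).reverse ++ suf := by
  intro pre
  induction pre using List.reverseRecOn with
  | nil => intro x suf; simp [pvInnerA, pvInsRev]
  | append_singleton q y ih =>
    intro x suf
    have hA : (q ++ [y]) ++ x :: suf = q ++ y :: x :: suf := by simp
    have hlen : (q ++ [y]).length = q.length + 1 := by simp
    rw [hA, hlen]
    have hg1 : (q ++ y :: x :: suf)[q.length]? = some y := pv_get_mid q y (x :: suf)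
    have hg2 : (q ++ y :: x :: suf)[q.length + 1]? = some x := by
      have h := pv_get_mid (q ++ [y]) x suf
      rw [List.length_append, List.length_cons, List.length_nil, Nat.zero_add] at h
      simp only [List.append_assoc, List.cons_append, List.nil_append] at h; exact h
    rw [pvInnerA, hg1, hg2]
    by_cases hc : y.1 > x.1
    · simp only [hc, if_pos]
      rw [pv_set_swap, ih x (y :: suf)]
      simp [pvInsRev, hc]
    · simp only [hc, if_false]
      simp [pvInsRev, hc]

lemma pvRevSort_length (L : List (Int × Int)) : (pvRevSort L).length = L.length :=
  (pvRevSort_perm L).length_eq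

lemma pvRevSort_concat (L : List (Int × Int)) (x : Int × Int) :
    pvRevSort (L ++ [x]) = pvInsRev x (pvRevSort L) := by
  simp [pvRevSort, List.foldl_append]

lemma pvSort_inv : ∀ (todo acc : List (Int × Int)), acc ≠ [] →
    (List.range' acc.length todo.length).foldl (fun A i => pvInnerA A i)
        ((pvRevSort acc).reverse ++ todo)
      = (pvRevSort (acc ++ todo)).reverse := by
  intro todo
  induction todo with
  | nil => intro acc h; simp
  | cons x todo' ih =>
    intro acc h
    have hstep : pvInnerA ((pvRevSort acc).reverse ++ x :: todo') acc.length
        = (pvInsRev x (pvRevSort acc)).reverse ++ todo' := by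
      have hl : (pvRevSort acc).reverse.length = acc.length := by
        simp [pvRevSort_length]
      calc pvInnerA ((pvRevSort acc).reverse ++ x :: todo') acc.length
          = pvInnerA ((pvRevSort acc).reverse ++ x :: todo') (pvRevSort acc).reverse.length := by
            rw [hl]
        _ = (pvInsRev x (pvRevSort acc).reverse.reverse).reverse ++ todo' :=
            pvInner_spec _ x todo'
        _ = (pvInsRev x (pvRevSort acc)).reverse ++ todo' := by rw [List.reverse_reverse]
    have hrange : List.range' acc.length (x :: todo').length
        = acc.length :: List.range' (acc.length + 1) todo'.length := by
      simp [List.range'_succ]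
    rw [hrange]
    simp only [List.foldl_cons, hstep]
    rw [← pvRevSort_concat]
    have hlen2 : (acc ++ [x]).length = acc.length + 1 := by simp
    have := ih (acc ++ [x]) (by simp)
    rw [hlen2] at this
    rw [this]
    simp

lemma pvSortA_pairs (T : List Int) :
    pvSortA (pvPairs T) T.length = (pvRevSort (pvPairs T)).reverse := by
  cases T with
  | nil => rfl
  | cons t T' =>
    have hp : pvPairs (t :: T') = (t, (0 : Int)) :: (T'.zipIdx 1).map (fun p => (p.1, (p.2 : Int))) := by
      simp [pvPairs]
    have hlen : ((T'.zipIdx 1).map (fun p => ((p.1 : Int), (p.2 : Int)))).length = T'.length := by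
      simp
    have h := pvSort_inv ((T'.zipIdx 1).map (fun p => (p.1, (p.2 : Int)))) [(t, (0 : Int))]
      (by simp)
    simp only [List.length_cons, List.length_map, List.length_zipIdx] at h ⊢
    rw [pvSortA, hp]
    simpa [pvRevSort, pvInsRev] using h

lemma pvMem_insRev {z x : Int × Int} {r : List (Int × Int)} (h : z ∈ pvInsRev x r) :
    z = x ∨ z ∈ r := by
  have := (pvInsRev_perm x r).mem_iff.mp h
  simpa using this

lemma pvInsRev_sorted (x : Int × Int) : ∀ (r : List (Int × Int)),
    List.Pairwise (fun a b => pvLexLt b a = true) r → (∀ y ∈ r, y.2 < x.2) →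
    List.Pairwise (fun a b => pvLexLt b a = true) (pvInsRev x r) := by
  intro r
  induction r with
  | nil => intro _ _; simp [pvInsRev]
  | cons y r ih =>
    intro hp hb
    rw [List.pairwise_cons] at hp
    simp only [pvInsRev]
    by_cases hc : y.1 > x.1
    · rw [if_pos hc]
      refine List.pairwise_cons.mpr ⟨?_, ih hp.2 (fun z hz => hb z (List.mem_cons_of_mem _ hz))⟩
      intro z hz
      rcases pvMem_insRev hz with rfl | hz'
      · simp [pvLexLt]; omega
      · exact hp.1 z hz'
    · rw [if_neg hc]
      have hyx : pvLexLt y x = true := by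
        have := hb y (List.mem_cons_self)
        simp [pvLexLt] at *; omega
      refine List.pairwise_cons.mpr ⟨?_, List.pairwise_cons.mpr ⟨hp.1, hp.2⟩⟩
      intro z hz
      rcases List.mem_cons.mp hz with rfl | hz'
      · exact hyx
      · exact pvLexLt_trans (hp.1 z hz') hyx

lemma pvFoldInsRev_sorted : ∀ (L r : List (Int × Int)),
    List.Pairwise (fun a b => pvLexLt b a = true) r →
    (∀ y ∈ r, ∀ x ∈ L, y.2 < x.2) →
    List.Pairwise (fun (a b : Int × Int) => a.2 < b.2) L →
    List.Pairwise (fun a b => pvLexLt b a = true) (L.foldl (fun r x => pvInsRev x r) r) := by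
  intro L
  induction L with
  | nil => intro r h _ _; simpa using h
  | cons x L ih =>
    intro r hp hb hL
    rw [List.pairwise_cons] at hL
    simp only [List.foldl_cons]
    refine ih (pvInsRev x r) ?_ ?_ hL.2
    · exact pvInsRev_sorted x r hp (fun y hy => hb y hy x List.mem_cons_self)
    · intro y hy z hz
      rcases pvMem_insRev hy with rfl | hy'
      · exact hL.1 z hz
      · exact hb y hy' z (List.mem_cons_of_mem _ hz)

lemma pvZipIdx_snd_lt : ∀ (T : List Int) (k : Nat),
    List.Pairwise (fun (a b : Int × Nat) => a.2 < b.2) (T.zipIdx k) := by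
  intro T
  induction T with
  | nil => intro k; simp
  | cons t T ih =>
    intro k
    refine List.pairwise_cons.mpr ⟨?_, ih (k + 1)⟩
    intro p hp
    have := List.mem_zipIdx hp
    omega

lemma pvPairs_snd_lt (T : List Int) :
    List.Pairwise (fun (a b : Int × Int) => a.2 < b.2) (pvPairs T) := by
  refine List.Pairwise.map _ ?_ (pvZipIdx_snd_lt T 0)
  intro a b h
  simpa using h

lemma pvRevSort_sorted (T : List Int) :
    List.Pairwise (fun a b => pvLexLt a b = true) (pvRevSort (pvPairs T)).reverse := by
  rw [List.pairwise_reverse]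
  exact pvFoldInsRev_sorted (pvPairs T) [] (by simp) (by simp) (pvPairs_snd_lt T)

lemma pvZipIdx_map_sorted {α : Type} (F : Int × Int → Nat → α) :
    ∀ (S : List (Int × Int)) (k : Nat), List.Pairwise (fun a b => pvLexLt a b = true) S →
    (S.zipIdx k).map (fun p => F p.1 p.2)
      = S.map (fun q => F q (k + S.countP (fun z => pvLexLt z q))) := by
  intro S
  induction S with
  | nil => intro k _; simp
  | cons a S ih =>
    intro k hp
    rw [List.pairwise_cons] at hp
    have hcnt0 : (a :: S).countP (fun z => pvLexLt z a) = 0 := by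
      rw [List.countP_eq_zero]
      intro z hz
      rcases List.mem_cons.mp hz with rfl | hz'
      · simp [pvLexLt_irrefl]
      · simp [pvLexLt_asymm (hp.1 z hz')]
    simp only [List.zipIdx_cons, List.map_cons, ih (k + 1) hp.2]
    congr 1
    · rw [hcnt0]; simp
    · refine List.map_congr_left ?_
      intro q hq
      have : (a :: S).countP (fun z => pvLexLt z q) = S.countP (fun z => pvLexLt z q) + 1 := by
        rw [List.countP_cons]
        simp [hp.1 q hq]
      rw [this]
      congr 1
      omega

lemma pvCnt_pairs : ∀ (T : List Int) (k i : Nat) (x : Int),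
    ((T.zipIdx k).map (fun p => ((p.1 : Int), (p.2 : Int)))).countP
        (fun z => pvLexLt z (x, (i : Int)))
      = T.countP (fun y => decide (y < x)) + (T.take (i - k)).countP (fun y => decide (y = x)) := by
  intro T
  induction T with
  | nil => intro k i x; simp
  | cons t T ih =>
    intro k i x
    simp only [List.zipIdx_cons, List.map_cons, List.countP_cons, ih (k + 1) i x]
    by_cases h1 : t < x
    · have hne : ¬ t = x := by omega
      have hlt : pvLexLt ((t : Int), (k : Int)) (x, (i : Int)) = true := by
        simp [pvLexLt]; omega
      rcases Nat.lt_or_ge k i with hk | hk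
      · have : i - k = (i - (k + 1)) + 1 := by omega
        rw [this]
        simp [hlt, h1, hne]
        omega
      · have h0 : i - k = 0 := by omega
        have h0' : i - (k + 1) = 0 := by omega
        rw [h0, h0']
        simp [hlt, h1]
    · by_cases h2 : t = x
      · subst h2
        rcases Nat.lt_or_ge k i with hk | hk
        · have hlt : pvLexLt ((t : Int), (k : Int)) (t, (i : Int)) = true := by
            simp [pvLexLt]; omega
          have : i - k = (i - (k + 1)) + 1 := by omega
          rw [this]
          simp [hlt]
          omega
        · have hlt : pvLexLt ((t : Int), (k : Int)) (t, (i : Int)) = false := by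
            simp [pvLexLt]; omega
          have h0 : i - k = 0 := by omega
          have h0' : i - (k + 1) = 0 := by omega
          rw [h0, h0']
          simp [hlt]
      · have hlt : pvLexLt ((t : Int), (k : Int)) (x, (i : Int)) = false := by
          simp [pvLexLt]; omega
        rcases Nat.lt_or_ge k i with hk | hk
        · have : i - k = (i - (k + 1)) + 1 := by omega
          rw [this]
          simp [hlt, h1, h2]
        · have h0 : i - k = 0 := by omega
          have h0' : i - (k + 1) = 0 := by omega
          rw [h0, h0']
          simp [hlt, h1]

lemma pv_bridge (l : List ((Int × Int) × Nat)) (f : (Int × Int) × Nat → Int) :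
    l.foldl (fun k p => max k (f p)) 0 = (l.map f).foldl max 0 := by
  rw [List.foldl_map]

lemma pv_bridge2 (l : List (Int × Nat)) (f : Int × Nat → Int) :
    l.foldl (fun k p => max k (f p)) 0 = (l.map f).foldl max 0 := by
  rw [List.foldl_map]

lemma pv_foldl_max_perm {l₁ l₂ : List Int} (h : l₁.Perm l₂) :
    l₁.foldl max 0 = l₂.foldl max 0 :=
  h.foldl_eq (rcomm := ⟨fun _ _ _ => max_right_comm _ _ _⟩) (b := 0)

lemma pv_main (T : List Int) : chaos_index T = chaos_index_alt T := by
  have hsorted := pvRevSort_sorted T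
  have hperm : ((pvRevSort (pvPairs T)).reverse).Perm (pvPairs T) :=
    (List.reverse_perm _).trans (pvRevSort_perm _)
  have e1 : chaos_index T
      = ((pvRevSort (pvPairs T)).reverse).zipIdx.foldl (fun k p => max k |p.1.2 - (p.2 : Int)|) 0 := by
    have hh : pvSortA (T.zipIdx.map (fun p => (p.1, (p.2 : Int)))) T.length
        = (pvRevSort (pvPairs T)).reverse := pvSortA_pairs T
    simp only [chaos_index, hh]
  rw [e1, chaos_index_alt, pv_bridge _ (fun p => |p.1.2 - (p.2 : Int)|),
    pv_bridge2 _ (fun p => |pvRankB T p.2 p.1 - (p.2 : Int)|)]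
  apply pv_foldl_max_perm
  have h1 : ((pvRevSort (pvPairs T)).reverse).zipIdx.map (fun p => |p.1.2 - (p.2 : Int)|)
      = ((pvRevSort (pvPairs T)).reverse).map
          (fun q => |q.2 - ((0 + ((pvRevSort (pvPairs T)).reverse).countP (fun z => pvLexLt z q) : Nat) : Int)|) :=
    pvZipIdx_map_sorted (fun q j => |q.2 - (j : Int)|) _ 0 hsorted
  rw [h1]
  have h2 : ((pvRevSort (pvPairs T)).reverse).map
        (fun q => |q.2 - ((0 + ((pvRevSort (pvPairs T)).reverse).countP (fun z => pvLexLt z q) : Nat) : Int)|)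
      = ((pvRevSort (pvPairs T)).reverse).map
        (fun q => |q.2 - ((pvPairs T).countP (fun z => pvLexLt z q) : Int)|) := by
    refine List.map_congr_left ?_
    intro q _
    rw [Nat.zero_add, hperm.countP_eq]
  rw [h2]
  refine (hperm.map _).trans ?_
  have h4 : (pvPairs T).map (fun q => |q.2 - ((pvPairs T).countP (fun z => pvLexLt z q) : Int)|)
      = T.zipIdx.map (fun p => |(p.2 : Int) - ((pvPairs T).countP (fun z => pvLexLt z (p.1, (p.2 : Int))) : Int)|) := by
    simp [pvPairs, List.map_map, Function.comp]
  rw [h4]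
  refine List.Perm.of_eq (List.map_congr_left ?_)
  intro p _
  have hc : (pvPairs T).countP (fun z => pvLexLt z (p.1, (p.2 : Int)))
      = T.countP (fun y => decide (y < p.1)) + (T.take (p.2 - 0)).countP (fun y => decide (y = p.1)) :=
    pvCnt_pairs T 0 p.2 p.1
  rw [hc, Nat.sub_zero, pvRankB]
  push_cast
  rw [abs_sub_comm]

-- ===== VERDICT (by name: the statement is the Claim_ definition above) =====
theorem chaos_index_spec : Claim_equal_chaos_index := by
  intro T _
  exact pv_main T
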